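-- pv_equiv track=rewrite | github.com/YJ124/STR_PG | pgg_map_optimized.py | syncmer_positions
-- ===== SOURCE A (Python) =====
-- def syncmer_positions(seq: str, k: int, s: int, t: int):
--     n = len(seq)
--     if k > n or s > k or t < 0 or t > k - s:
--         return []
--     pos = []
--     for i in range(0, n - k + 1):
--         kmer = seq[i:i + k]
--         minv = None
--         minp = None
--         for j in range(0, k - s + 1):
--             v = kmer[j:j + s]
--             if (minv is None) or (v < minv):
--                 minv, minp = v, j
--         if minp == t:
--             pos.append(i)
--     return pos
-- ===== SOURCE B (Python) =====
-- def syncmer_positions(seq: str, k: int, s: int, t: int):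
--     n = len(seq)
--     if k > n or s > k or t < 0 or t > k - s:
--         return []
--     w = k - s
--     # all s-mers of seq, computed once
--     smers = [seq[p:p + s] for p in range(n - s + 1)]
--     dq = []   # indices of smers forming a monotonic (non-decreasing) queue
--     res = []
--     for p in range(n - s + 1):
--         v = smers[p]
--         while dq and smers[dq[-1]] > v:
--             dq.pop()
--         dq.append(p)
--         i = p - w
--         if i >= 0:
--             if dq[0] < i:
--                 dq.pop(0)
--             if dq[0] - i == t:
--                 res.append(i)
--     return res
-- ===== Notes on version B (the rewrite author's own statement) =====
-- stated objective: faster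
-- what changed: Replaced the per-window rescan of all k-s+1 s-mers (each re-sliced from the k-mer) by a single precomputed s-mer array and a monotonic-queue sliding-window minimum with leftmost-min tie-break, so each s-mer is sliced and compared O(1) amortized times.
-- outside the precondition, e.g. on syncmer_positions('b\ta\ta c', 6, -2, 2): A returns [0, 1], B returns [0]
import Mathlib
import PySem

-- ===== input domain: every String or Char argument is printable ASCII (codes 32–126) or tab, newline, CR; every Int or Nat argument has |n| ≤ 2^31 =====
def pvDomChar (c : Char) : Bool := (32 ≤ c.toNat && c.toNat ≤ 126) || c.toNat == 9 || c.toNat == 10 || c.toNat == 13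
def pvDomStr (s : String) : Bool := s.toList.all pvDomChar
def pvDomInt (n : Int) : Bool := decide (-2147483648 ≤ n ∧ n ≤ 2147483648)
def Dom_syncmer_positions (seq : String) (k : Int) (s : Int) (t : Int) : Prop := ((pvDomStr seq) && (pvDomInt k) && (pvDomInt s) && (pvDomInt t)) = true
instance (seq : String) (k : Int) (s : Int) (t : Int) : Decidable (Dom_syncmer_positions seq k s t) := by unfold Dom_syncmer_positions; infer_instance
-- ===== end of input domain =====

-- B replaces A's per-window rescan of freshly re-sliced s-mers by one precomputed s-mer array
-- and a monotonic-queue sliding-window minimum (leftmost-min tie-break): objective = faster.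

-- ===== PORT A =====
-- inner-loop body of A: update (minv, minp) with v = kmer[j:j+s]
def pvMinStep (kmer : List Char) (s : Int) (mm : Option (List Char) × Option Int) (j : Int) :
    Option (List Char) × Option Int :=
  let v := PySem.List.slice kmer (some j) (some (j + s))
  match mm.1 with
  | none => (some v, some j)
  | some mv => if v < mv then (some v, some j) else mm

def syncmer_positions (seq : String) (k : Int) (s : Int) (t : Int) : List Int :=
  let n : Int := PySem.Str.len seq
  if k > n ∨ s > k ∨ t < 0 ∨ t > k - s then []
  else
    (PySem.List.pyRange 0 (n - k + 1) 1).foldl (fun pos i =>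
      let kmer := PySem.List.slice seq.toList (some i) (some (i + k))
      let mm := (PySem.List.pyRange 0 (k - s + 1) 1).foldl (pvMinStep kmer s) (none, none)
      if mm.2 = some t then pos ++ [i] else pos) []

-- ===== PORT B =====
-- B's while-loop: pop indices from the back of dq while smers[dq[-1]] > v
-- (indexing is pyGetD: every index B ever looks up is in range, so the default is never used)
def pvPopBack (smers : List (List Char)) (v : List Char) (dq : List Int) : List Int :=
  if _hne : dq = [] then dq
  else
    if v < PySem.List.pyGetD smers (PySem.List.pyGetD dq (-1) 0) [] then
      pvPopBack smers v dq.dropLast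
    else dq
termination_by dq.length
decreasing_by
  have h : 0 < dq.length := List.length_pos_iff.mpr _hne
  simp [List.length_dropLast]; omega

-- B's loop body: state is (dq, res)
def pvStep (smers : List (List Char)) (w t : Int) (st : List Int × List Int) (p : Int) :
    List Int × List Int :=
  let v := PySem.List.pyGetD smers p []
  let dq0 := pvPopBack smers v st.1
  let dq1 := dq0 ++ [p]
  let i := p - w
  if 0 ≤ i then
    let dq2 := if PySem.List.pyGetD dq1 0 0 < i then dq1.tail else dq1
    if PySem.List.pyGetD dq2 0 0 - i = t then (dq2, st.2 ++ [i]) else (dq2, st.2)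
  else (dq1, st.2)

def syncmer_positions_alt (seq : String) (k : Int) (s : Int) (t : Int) : List Int :=
  let n : Int := PySem.Str.len seq
  if k > n ∨ s > k ∨ t < 0 ∨ t > k - s then []
  else
    let w := k - s
    let smers := (PySem.List.pyRange 0 (n - s + 1) 1).map
      (fun p => PySem.List.slice seq.toList (some p) (some (p + s)))
    ((PySem.List.pyRange 0 (n - s + 1) 1).foldl (pvStep smers w t) ([], [])).2

-- ===== PRECONDITION & SPEC =====
-- Pre_ excludes only the inputs that pass A's size guard with s ≤ 0: there the slice kmer[j:j+s]
-- hits Python's negative-stop (from-the-end) slicing, a corner no s-mer/syncmer notion specifies,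
-- and A's and B's values are both accidents of which string each happens to slice.
def Pre_syncmer_positions (seq : String) (k : Int) (s : Int) (t : Int) : Prop :=
  1 ≤ s ∨ k > PySem.Str.len seq ∨ s > k ∨ t < 0 ∨ t > k - s
instance (seq : String) (k : Int) (s : Int) (t : Int) : Decidable (Pre_syncmer_positions seq k s t) := by
  unfold Pre_syncmer_positions; infer_instance

def pvWitness_syncmer_positions : String × Int × Int × Int := ("abcab", 3, 1, 0)

def Spec_syncmer_positions (seq : String) (k : Int) (s : Int) (t : Int) (out : List Int) : Prop := out = syncmer_positions_alt seq k s t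
instance (seq : String) (k : Int) (s : Int) (t : Int) (out : List Int) : Decidable (Spec_syncmer_positions seq k s t out) := by unfold Spec_syncmer_positions; infer_instance

-- ===== CLAIM (what is proved, stated in full; the proofs are below) =====
def Claim_equal_syncmer_positions : Prop := ∀ (seq : String) (k : Int) (s : Int) (t : Int), Dom_syncmer_positions seq k s t → Pre_syncmer_positions seq k s t → Spec_syncmer_positions seq k s t (syncmer_positions seq k s t)

-- ===== LEMMAS AND PROOFS =====

-- q is "good at p": no strictly smaller value to its right within positions ≤ p
def pvGood (g : Int → List Char) (p q : Int) : Bool :=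
  (PySem.List.pyRange (q + 1) (p + 1) 1).all (fun r => decide (g q ≤ g r))

-- the monotonic queue's intended contents after processing position p, window start a
def pvCand (g : Int → List Char) (a p : Int) : List Int :=
  (PySem.List.pyRange a (p + 1) 1).filter (pvGood g p)

-- leftmost argmin of g on [i, i+w], computed by A's left-to-right strict-< scan
def pvLm (g : Int → List Char) (i w : Int) : Int :=
  (PySem.List.pyRange (i + 1) (i + w + 1) 1).foldl (fun best q => if g q < g best then q else best) i

theorem mem_pvCand {g : Int → List Char} {a p q : Int} :
    q ∈ pvCand g a p ↔ (a ≤ q ∧ q < p + 1) ∧ pvGood g p q = true := by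
  simp [pvCand, List.mem_filter, PySem.List.mem_pyRange_one]

theorem pvCand_pairwise_lt (g : Int → List Char) (a p : Int) :
    (pvCand g a p).Pairwise (· < ·) :=
  (PySem.List.pairwise_lt_pyRange_one a (p + 1)).filter _

-- spec of pvLm
theorem pvLm_spec (g : Int → List Char) (i : Int) (w : Nat) :
    i ≤ pvLm g i w ∧ pvLm g i w ≤ i + w ∧
    (∀ q, i ≤ q → q < pvLm g i w → g (pvLm g i w) < g q) ∧
    (∀ r, pvLm g i w < r → r ≤ i + w → g (pvLm g i w) ≤ g r) := by
  induction w with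
  | zero =>
    push_cast
    have h0 : pvLm g i 0 = i := by
      unfold pvLm
      rw [PySem.List.pyRange_one_eq_nil (by omega : i + 0 + 1 ≤ i + 1)]
      rfl
    rw [h0]
    refine ⟨le_refl _, by omega, fun q h1 h2 => absurd h2 (by omega), fun r h1 h2 => absurd h1 (by omega)⟩
  | succ w ih =>
    obtain ⟨ih1, ih2, ih3, ih4⟩ := ih
    push_cast
    have hsplit : PySem.List.pyRange (i + 1) (i + ((w : Int) + 1) + 1) 1
        = PySem.List.pyRange (i + 1) (i + (w : Int) + 1) 1 ++ [i + (w : Int) + 1] := by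
      rw [show i + ((w : Int) + 1) + 1 = (i + (w : Int) + 1) + 1 by ring]
      exact PySem.List.pyRange_one_succ_right (by omega)
    have hfold : pvLm g i ((w : Int) + 1)
        = if g (i + (w : Int) + 1) < g (pvLm g i (w : Int)) then i + (w : Int) + 1
          else pvLm g i (w : Int) := by
      unfold pvLm
      rw [hsplit, List.foldl_append]
      simp only [List.foldl_cons, List.foldl_nil]
    by_cases hlt : g (i + (w : Int) + 1) < g (pvLm g i (w : Int))
    · rw [hfold, if_pos hlt]
      refine ⟨by omega, by omega, ?_, fun r h1 h2 => absurd (lt_of_lt_of_le h1 (by omega)) (lt_irrefl _)⟩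
      intro q h1 h2
      rcases lt_trichotomy q (pvLm g i (w : Int)) with hq | hq | hq
      · exact lt_trans hlt (ih3 q h1 hq)
      · rw [hq]; exact hlt
      · exact lt_of_lt_of_le hlt (ih4 q hq (by omega))
    · rw [hfold, if_neg hlt]
      refine ⟨ih1, by omega, ih3, ?_⟩
      intro r h1 h2
      by_cases hr : r ≤ i + (w : Int)
      · exact ih4 r h1 hr
      · have : r = i + (w : Int) + 1 := by omega
        rw [this]; exact not_lt.mp hlt

theorem pvGood_le {g : Int → List Char} {p q r : Int} (hg : pvGood g p q = true)
    (h1 : q < r) (h2 : r ≤ p) : g q ≤ g r := by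
  simp only [pvGood, List.all_eq_true, PySem.List.mem_pyRange_one, decide_eq_true_eq] at hg
  exact hg r ⟨by omega, by omega⟩

theorem pvGood_self (g : Int → List Char) (p : Int) : pvGood g p p = true := by
  simp [pvGood, PySem.List.pyRange_one_eq_nil (le_refl (p + 1))]

theorem pvCand_pairwise_le (g : Int → List Char) (a p : Int) :
    (pvCand g a p).Pairwise (fun q r => g q ≤ g r) := by
  refine List.Pairwise.imp_of_mem ?_ (pvCand_pairwise_lt g a p)
  intro q r hq hr hlt
  have hq' := mem_pvCand.mp hq
  have hr' := mem_pvCand.mp hr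
  exact pvGood_le hq'.2 hlt (by omega)

theorem pvPopBack_eq_filter (smers : List (List Char)) (g : Int → List Char) (v : List Char)
    (dq : List Int) (hval : ∀ q ∈ dq, PySem.List.pyGetD smers q [] = g q)
    (hmono : dq.Pairwise (fun q r => g q ≤ g r)) :
    pvPopBack smers v dq = dq.filter (fun q => decide (g q ≤ v)) := by
  induction dq using List.reverseRecOn with
  | nil => simp [pvPopBack]
  | append_singleton ys q ih =>
    have hne : ys ++ [q] ≠ [] := by simp
    have hlast : PySem.List.pyGetD (ys ++ [q]) (-1) 0 = q :=
      PySem.List.pyGetD_neg_one_append_singleton ys q 0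
    have hqv : PySem.List.pyGetD smers q [] = g q := hval q (by simp)
    rw [pvPopBack, dif_neg hne, hlast, hqv, List.dropLast_concat]
    have hmys : ys.Pairwise (fun q r => g q ≤ g r) := hmono.sublist (by simp)
    have hyq : ∀ y ∈ ys, g y ≤ g q := by
      have h := (List.pairwise_append.mp hmono).2.2
      intro y hy; exact h y hy q (by simp)
    by_cases hlt : v < g q
    · rw [if_pos hlt, ih (fun x hx => hval x (by simp [hx])) hmys]
      have hq : (decide (g q ≤ v)) = false := by simp [not_le.mpr hlt]
      simp [List.filter_append, hq]
    · rw [if_neg hlt]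
      rw [List.filter_eq_self.mpr]
      intro x hx
      rcases List.mem_append.mp hx with hx | hx
      · simp [le_trans (hyq x hx) (not_lt.mp hlt)]
      · simp at hx; simp [hx, not_lt.mp hlt]

theorem pvCand_succ (g : Int → List Char) (a p : Int) (ha : a ≤ p) :
    pvCand g a p = (pvCand g a (p - 1)).filter (fun q => decide (g q ≤ g p)) ++ [p] := by
  unfold pvCand
  have hsplit : PySem.List.pyRange a (p + 1) 1 = PySem.List.pyRange a p 1 ++ [p] :=
    PySem.List.pyRange_one_succ_right ha
  rw [hsplit, List.filter_append]
  have hself : (List.filter (pvGood g p) [p]) = [p] := by simp [pvGood_self]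
  rw [hself]
  congr 1
  rw [List.filter_filter]
  rw [show p - 1 + 1 = p by ring]
  apply List.filter_congr
  intro q hq
  have hq' := PySem.List.mem_pyRange_one.mp hq
  have hsplit2 : PySem.List.pyRange (q + 1) (p + 1) 1
      = PySem.List.pyRange (q + 1) p 1 ++ [p] :=
    PySem.List.pyRange_one_succ_right (by omega)
  simp only [pvGood, hsplit2, List.all_append, List.all_cons, List.all_nil, Bool.and_true]
  rw [Bool.and_comm, show p - 1 + 1 = p by ring]

theorem pvCand_front (g : Int → List Char) (i p : Int) (_h1 : 1 ≤ i) (hip : i ≤ p) :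
    pvCand g (i - 1) p =
      (if pvGood g p (i - 1) = true then [i - 1] else []) ++ pvCand g i p := by
  unfold pvCand
  have hcons : PySem.List.pyRange (i - 1) (p + 1) 1 = (i - 1) :: PySem.List.pyRange i (p + 1) 1 := by
    have h := PySem.List.pyRange_one_cons (show i - 1 < p + 1 by omega)
    rw [show i - 1 + 1 = i by ring] at h
    exact h
  rw [hcons, List.filter_cons]
  split <;> simp_all

theorem pvCand_head (g : Int → List Char) (i : Int) (w : Nat) :
    (pvCand g i (i + w)).head? = some (pvLm g i w) := by
  obtain ⟨h1, h2, h3, h4⟩ := pvLm_spec g i w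
  have hmem : pvLm g i w ∈ pvCand g i (i + w) := by
    refine mem_pvCand.mpr ⟨⟨h1, by omega⟩, ?_⟩
    simp only [pvGood, List.all_eq_true, PySem.List.mem_pyRange_one, decide_eq_true_eq]
    intro r hr
    exact h4 r (by omega) (by omega)
  have hmin : ∀ x ∈ pvCand g i (i + w), pvLm g i w ≤ x := by
    intro x hx
    by_contra hxc
    push_neg at hxc
    have hx' := mem_pvCand.mp hx
    have hle : g x ≤ g (pvLm g i w) := pvGood_le hx'.2 hxc (by omega)
    have hgt : g (pvLm g i w) < g x := h3 x hx'.1.1 hxc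
    exact absurd hle (not_le.mpr hgt)
  cases hdq : pvCand g i (i + w) with
  | nil => rw [hdq] at hmem; simp at hmem
  | cons q rest =>
    rw [hdq] at hmem hmin
    have hpw := pvCand_pairwise_lt g i (i + w)
    rw [hdq] at hpw
    have hqm : pvLm g i w = q := by
      rcases List.mem_cons.mp hmem with h | h
      · exact h
      · have hlt := (List.pairwise_cons.mp hpw).1 _ h
        have hle := hmin q (by simp)
        omega
    simp [hqm]

-- pvStep unfolded (definitional)
theorem pvStep_eq (smers : List (List Char)) (w t : Int) (st : List Int × List Int) (p : Int) :
    pvStep smers w t st p =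
      (let dq1 := pvPopBack smers (PySem.List.pyGetD smers p []) st.1 ++ [p]
       if 0 ≤ p - w then
         let dq2 := if PySem.List.pyGetD dq1 0 0 < p - w then dq1.tail else dq1
         if PySem.List.pyGetD dq2 0 0 - (p - w) = t then (dq2, st.2 ++ [p - w]) else (dq2, st.2)
       else (dq1, st.2)) := rfl

theorem pvCand_head_getD (g : Int → List Char) (i : Int) (w : Int) (hw : 0 ≤ w) (p : Int)
    (hp : p = i + w) :
    PySem.List.pyGetD (pvCand g i p) 0 0 = pvLm g i w := by
  have h : (pvCand g i (i + (w.toNat : Int))).head? = some (pvLm g i (w.toNat : Int)) :=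
    pvCand_head g i w.toNat
  rw [Int.toNat_of_nonneg hw] at h
  rw [hp]
  cases hdq : pvCand g i (i + w) with
  | nil => rw [hdq] at h; simp at h
  | cons q rest =>
    rw [hdq] at h
    simp only [List.head?_cons, Option.some.injEq] at h
    rw [← h, PySem.List.pyGetD_zero_cons]

theorem pvStep_invariant (smers : List (List Char)) (g : Int → List Char) (w t : Int)
    (hw : 0 ≤ w) (m : Int) (_hm : 0 ≤ m)
    (hval : ∀ q : Int, 0 ≤ q → q ≤ m → PySem.List.pyGetD smers q [] = g q)
    (c : Int) (hc : 0 ≤ c) (hcm : c ≤ m + 1) :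
    (PySem.List.pyRange 0 c 1).foldl (pvStep smers w t) ([], []) =
      (pvCand g (max 0 (c - 1 - w)) (c - 1),
       (PySem.List.pyRange 0 (c - w) 1).filter (fun i => decide (pvLm g i w = i + t))) := by
  induction c, hc using Int.le_induction with
  | base =>
    rw [PySem.List.pyRange_one_eq_nil (by omega : (0:Int) ≤ 0),
        PySem.List.pyRange_one_eq_nil (by omega : (0:Int) - w ≤ 0)]
    simp [pvCand]
  | succ c hc ih =>
    have hcm' : c ≤ m := by omega
    have hprev := ih (by omega)
    have hsplit : PySem.List.pyRange 0 (c + 1) 1 = PySem.List.pyRange 0 c 1 ++ [c] :=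
      PySem.List.pyRange_one_succ_right hc
    rw [hsplit, List.foldl_append, hprev]
    set a := max 0 (c - 1 - w) with ha
    set resPrev := (PySem.List.pyRange 0 (c - w) 1).filter (fun i => decide (pvLm g i w = i + t)) with hres
    have hvc : PySem.List.pyGetD smers c [] = g c := hval c hc hcm'
    have hvin : ∀ q ∈ pvCand g a (c - 1), PySem.List.pyGetD smers q [] = g q := by
      intro q hq
      have h := mem_pvCand.mp hq
      have h2 : a ≤ q := h.1.1
      have h3 : q < c - 1 + 1 := h.1.2
      exact hval q (by omega) (by omega)
    have hpop : pvPopBack smers (g c) (pvCand g a (c - 1))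
        = (pvCand g a (c - 1)).filter (fun q => decide (g q ≤ g c)) :=
      pvPopBack_eq_filter smers g (g c) _ hvin (pvCand_pairwise_le g a (c - 1))
    have hac : a ≤ c := by omega
    have happ : (pvCand g a (c - 1)).filter (fun q => decide (g q ≤ g c)) ++ [c] = pvCand g a c :=
      (pvCand_succ g a c hac).symm
    simp only [List.foldl_cons, List.foldl_nil]
    rw [pvStep_eq]
    simp only [hvc, hpop, happ]
    by_cases hi : 0 ≤ c - w
    · -- the window [c-w, c] is complete
      rw [if_pos hi]
      have hlb : c - w ≤ pvLm g (c - w) w := by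
        have h := (pvLm_spec g (c - w) w.toNat).1
        rwa [Int.toNat_of_nonneg hw] at h
      have hdq2 : (if PySem.List.pyGetD (pvCand g a c) 0 0 < c - w
            then (pvCand g a c).tail else pvCand g a c) = pvCand g (c - w) c := by
        by_cases hi1 : 1 ≤ c - w
        · have ha' : a = (c - w) - 1 := by
            rw [ha, show c - 1 - w = c - w - 1 by ring]
            exact max_eq_right (by omega)
          have hfront := pvCand_front g (c - w) c hi1 (by omega)
          rw [ha', hfront]
          by_cases hgood : pvGood g c ((c - w) - 1) = true
          · rw [if_pos hgood, List.singleton_append, PySem.List.pyGetD_zero_cons,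
                if_pos (by omega : (c - w) - 1 < c - w), List.tail_cons]
          · rw [if_neg hgood, List.nil_append,
                pvCand_head_getD g (c - w) w hw c (by omega),
                if_neg (by omega : ¬ pvLm g (c - w) w < c - w)]
        · have h0 : c - w = 0 := by omega
          have ha' : a = c - w := by
            rw [ha, h0]
            exact max_eq_left (by omega)
          rw [ha', pvCand_head_getD g (c - w) w hw c (by omega),
              if_neg (by omega : ¬ pvLm g (c - w) w < c - w)]
      rw [hdq2, pvCand_head_getD g (c - w) w hw c (by omega)]
      have hmax : max 0 (c + 1 - 1 - w) = c - w := by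
        rw [show c + 1 - 1 - w = c - w by ring]
        exact max_eq_right hi
      have hrsplit : PySem.List.pyRange 0 (c + 1 - w) 1
          = PySem.List.pyRange 0 (c - w) 1 ++ [c - w] := by
        rw [show c + 1 - w = (c - w) + 1 by ring]
        exact PySem.List.pyRange_one_succ_right hi
      rw [hmax, hrsplit, List.filter_append, show c + 1 - 1 = c by ring]
      by_cases hcond : pvLm g (c - w) w - (c - w) = t
      · rw [if_pos hcond]
        have hone : (List.filter (fun i => decide (pvLm g i w = i + t)) [c - w]) = [c - w] := by
          simp only [List.filter_cons, List.filter_nil]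
          rw [if_pos (by simp only [decide_eq_true_eq]; omega)]
        rw [hone, hres]
      · rw [if_neg hcond]
        have hone : (List.filter (fun i => decide (pvLm g i w = i + t)) [c - w]) = [] := by
          simp only [List.filter_cons, List.filter_nil]
          rw [if_neg (by simp only [decide_eq_true_eq]; omega)]
        rw [hone, List.append_nil, hres]
    · -- window not complete yet
      rw [if_neg hi]
      have h1 : max 0 (c + 1 - 1 - w) = a := by
        rw [ha, show c + 1 - 1 - w = c - w by ring]
        rw [max_eq_left (by omega), max_eq_left (by omega)]
      have h2 : PySem.List.pyRange 0 (c + 1 - w) 1 = PySem.List.pyRange 0 (c - w) 1 := by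
        rw [PySem.List.pyRange_one_eq_nil (by omega : c + 1 - w ≤ 0),
            PySem.List.pyRange_one_eq_nil (by omega : c - w ≤ 0)]
      rw [h1, h2, show c + 1 - 1 = c by ring, hres]

-- A's inner-loop argmin scan, value-level form
def pvSel (kmer : List Char) (s : Int) (best j : Int) : Int :=
  if PySem.List.slice kmer (some j) (some (j + s)) < PySem.List.slice kmer (some best) (some (best + s))
  then j else best

theorem pvMinStep_shape (kmer : List Char) (s : Int) (l : List Int) (b : Int) :
    l.foldl (pvMinStep kmer s) (some (PySem.List.slice kmer (some b) (some (b + s))), some b) =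
      (some (PySem.List.slice kmer (some (l.foldl (pvSel kmer s) b)) (some (l.foldl (pvSel kmer s) b + s))),
       some (l.foldl (pvSel kmer s) b)) := by
  induction l generalizing b with
  | nil => simp
  | cons j l ih =>
    rw [List.foldl_cons, List.foldl_cons]
    have hstep : pvMinStep kmer s (some (PySem.List.slice kmer (some b) (some (b + s))), some b) j
        = (some (PySem.List.slice kmer (some (pvSel kmer s b j)) (some (pvSel kmer s b j + s))),
           some (pvSel kmer s b j)) := by
      unfold pvMinStep pvSel
      by_cases h : PySem.List.slice kmer (some j) (some (j + s))
          < PySem.List.slice kmer (some b) (some (b + s))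
      · simp only [if_pos h]
      · simp only [if_neg h]
    rw [hstep, ih]

-- slice of a slice
theorem pvSliceSlice (L : List Char) (i k s j : Int) (hi : 0 ≤ i) (hj : 0 ≤ j) (hs : 0 ≤ s)
    (hjk : j + s ≤ k) :
    PySem.List.slice (PySem.List.slice L (some i) (some (i + k))) (some j) (some (j + s)) =
      PySem.List.slice L (some (i + j)) (some (i + j + s)) := by
  have hk : (0:Int) ≤ k := by omega
  obtain ⟨I, rfl⟩ := Int.eq_ofNat_of_zero_le hi
  obtain ⟨J, rfl⟩ := Int.eq_ofNat_of_zero_le hj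
  obtain ⟨S, rfl⟩ := Int.eq_ofNat_of_zero_le hs
  obtain ⟨K, rfl⟩ := Int.eq_ofNat_of_zero_le hk
  have hJS : J + S ≤ K := by exact_mod_cast hjk
  rw [PySem.List.slice_natCast_add, PySem.List.slice_natCast_add]
  rw [show ((I:Int) + J + S) = ((I + J : Nat) : Int) + (S : Int) by push_cast; ring,
      show ((I:Int) + J) = ((I + J : Nat) : Int) by push_cast; ring,
      PySem.List.slice_natCast_add]
  rw [List.drop_take, List.drop_drop, List.take_take]
  rw [min_eq_left (by omega)]

-- a foldl that conditionally appends is a filter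
theorem pvFoldFilter (l : List Int) (f : List Int → Int → List Int) (P : Int → Bool)
    (h : ∀ acc x, x ∈ l → f acc x = if P x then acc ++ [x] else acc) (init : List Int) :
    l.foldl f init = init ++ l.filter P := by
  induction l generalizing init with
  | nil => simp
  | cons x l ih =>
    rw [List.foldl_cons, h init x List.mem_cons_self, List.filter_cons]
    by_cases hp : P x
    · rw [if_pos hp, if_pos hp, ih (fun acc y hy => h acc y (List.mem_cons_of_mem _ hy))]
      simp
    · rw [if_neg hp, if_neg hp, ih (fun acc y hy => h acc y (List.mem_cons_of_mem _ hy))]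

-- shifting A's relative-offset argmin scan to absolute positions
theorem pvFoldShift (g : Int → List Char) (kmer : List Char) (s i : Int) (l : List Int)
    (hcomp : ∀ j ∈ l, PySem.List.slice kmer (some j) (some (j + s)) = g (i + j))
    (b : Int) (hb : PySem.List.slice kmer (some b) (some (b + s)) = g (i + b)) :
    i + l.foldl (pvSel kmer s) b
      = (l.map (fun j => i + j)).foldl (fun best q => if g q < g best then q else best) (i + b) := by
  induction l generalizing b with
  | nil => simp
  | cons j l ih =>
    rw [List.map_cons, List.foldl_cons, List.foldl_cons]
    have hj := hcomp j List.mem_cons_self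
    have hrest : ∀ x ∈ l, PySem.List.slice kmer (some x) (some (x + s)) = g (i + x) :=
      fun x hx => hcomp x (List.mem_cons_of_mem _ hx)
    unfold pvSel
    by_cases h : PySem.List.slice kmer (some j) (some (j + s))
        < PySem.List.slice kmer (some b) (some (b + s))
    · rw [if_pos h, if_pos (by rw [← hj, ← hb]; exact h)]
      exact ih hrest j hj
    · rw [if_neg h, if_neg (by rw [← hj, ← hb]; exact h)]
      exact ih hrest b hb

theorem pvMapRange (i a b : Int) :
    (PySem.List.pyRange a b 1).map (fun j => i + j) = PySem.List.pyRange (i + a) (i + b) 1 := by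
  rw [PySem.List.pyRange_one, PySem.List.pyRange_one, List.map_map]
  rw [show (i + b) - (i + a) = b - a by ring]
  apply List.map_congr_left
  intro x _
  simp [Function.comp]
  ring

-- the main equivalence on the non-guard path
theorem pvMain (L : List Char) (k s t : Int) (hs1 : 1 ≤ s) (hsk : s ≤ k)
    (hkn : k ≤ (L.length : Int)) (ht0 : 0 ≤ t) (htk : t ≤ k - s) :
    (PySem.List.pyRange 0 ((L.length : Int) - k + 1) 1).foldl
      (fun pos i =>
        let kmer := PySem.List.slice L (some i) (some (i + k))
        let mm := (PySem.List.pyRange 0 (k - s + 1) 1).foldl (pvMinStep kmer s) (none, none)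
        if mm.2 = some t then pos ++ [i] else pos) []
    = ((PySem.List.pyRange 0 ((L.length : Int) - s + 1) 1).foldl
        (pvStep ((PySem.List.pyRange 0 ((L.length : Int) - s + 1) 1).map
          (fun p => PySem.List.slice L (some p) (some (p + s)))) (k - s) t) ([], [])).2 := by
  have hn0 : (0:Int) ≤ (L.length : Int) := by positivity
  set n : Int := (L.length : Int) with hn
  set g : Int → List Char := fun q => PySem.List.slice L (some q) (some (q + s)) with hg
  set smers := (PySem.List.pyRange 0 (n - s + 1) 1).map
    (fun p => PySem.List.slice L (some p) (some (p + s))) with hsm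
  have hval : ∀ q : Int, 0 ≤ q → q ≤ n - s → PySem.List.pyGetD smers q [] = g q := by
    intro q h0 h1
    rw [hsm, PySem.List.pyGetD_map_pyRange_of_nonneg _ _ _ _ h0 (by omega)]
  have hB := pvStep_invariant smers g (k - s) t (by omega) (n - s) (by omega) hval
      (n - s + 1) (by omega) (by omega)
  have hB2 : ((PySem.List.pyRange 0 (n - s + 1) 1).foldl (pvStep smers (k - s) t) ([], [])).2
      = (PySem.List.pyRange 0 (n - k + 1) 1).filter
          (fun i => decide (pvLm g i (k - s) = i + t)) := by
    rw [hB, show n - s + 1 - (k - s) = n - k + 1 by ring]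
  rw [hB2]
  have hbody : ∀ (acc : List Int) (i : Int), i ∈ PySem.List.pyRange 0 (n - k + 1) 1 →
      (fun pos i =>
        let kmer := PySem.List.slice L (some i) (some (i + k))
        let mm := (PySem.List.pyRange 0 (k - s + 1) 1).foldl (pvMinStep kmer s) (none, none)
        if mm.2 = some t then pos ++ [i] else pos) acc i
      = if decide (pvLm g i (k - s) = i + t) then acc ++ [i] else acc := by
    intro acc i hi
    have hi' := PySem.List.mem_pyRange_one.mp hi
    have hcompj : ∀ j, 0 ≤ j → j + s ≤ k →
        PySem.List.slice (PySem.List.slice L (some i) (some (i + k))) (some j) (some (j + s))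
          = g (i + j) := by
      intro j h0 h1
      rw [hg]
      exact pvSliceSlice L i k s j (by omega) h0 (by omega) h1
    have hrange : PySem.List.pyRange 0 (k - s + 1) 1 = 0 :: PySem.List.pyRange 1 (k - s + 1) 1 := by
      have h := PySem.List.pyRange_one_cons (show (0:Int) < k - s + 1 by omega)
      rw [show (0:Int) + 1 = 1 by ring] at h
      exact h
    show (if ((PySem.List.pyRange 0 (k - s + 1) 1).foldl
          (pvMinStep (PySem.List.slice L (some i) (some (i + k))) s) (none, none)).2 = some t
        then acc ++ [i] else acc)
      = if decide (pvLm g i (k - s) = i + t) then acc ++ [i] else acc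
    rw [hrange, List.foldl_cons]
    have hstep0 : pvMinStep (PySem.List.slice L (some i) (some (i + k))) s (none, none) 0
        = (some (PySem.List.slice (PySem.List.slice L (some i) (some (i + k))) (some 0) (some (0 + s))), some 0) := rfl
    rw [hstep0, pvMinStep_shape]
    have hshift := pvFoldShift g (PySem.List.slice L (some i) (some (i + k))) s i
      (PySem.List.pyRange 1 (k - s + 1) 1)
      (fun j hj => by
        have hj' := PySem.List.mem_pyRange_one.mp hj
        exact hcompj j (by omega) (by omega))
      0 (hcompj 0 (le_refl 0) (by omega))
    have hjs : i + (PySem.List.pyRange 1 (k - s + 1) 1).foldl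
        (pvSel (PySem.List.slice L (some i) (some (i + k))) s) 0 = pvLm g i (k - s) := by
      rw [hshift, pvMapRange, add_zero, show i + (k - s + 1) = i + (k - s) + 1 by ring]
      rfl
    by_cases hc : pvLm g i (k - s) = i + t
    · rw [if_pos (by simp only [Option.some.injEq]; omega), if_pos (by simp [hc])]
    · rw [if_neg (by simp only [Option.some.injEq]; omega), if_neg (by simp [hc])]
  rw [pvFoldFilter _ _ _ hbody [], List.nil_append]

-- ===== VERDICT (by name: the statement is the Claim_ definition above) =====
theorem syncmer_positions_spec : Claim_equal_syncmer_positions := by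
  unfold Claim_equal_syncmer_positions
  intro seq k s t _ hpre
  unfold Spec_syncmer_positions
  simp only [syncmer_positions, syncmer_positions_alt]
  by_cases hguard : k > PySem.Str.len seq ∨ s > k ∨ t < 0 ∨ t > k - s
  · rw [if_pos hguard, if_pos hguard]
  · rw [if_neg hguard, if_neg hguard]
    push_neg at hguard
    obtain ⟨hkn, hsk, ht0, htk⟩ := hguard
    have hs1 : 1 ≤ s := by
      rcases hpre with h | h | h | h | h
      · exact h
      all_goals omega
    have hlen : PySem.Str.len seq = (seq.toList.length : Int) := by
      simp [PySem.Str.len_eq]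
    rw [hlen] at hkn ⊢
    exact pvMain seq.toList k s t hs1 hsk hkn ht0 htk
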